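-- pv_equiv track=rewrite | github.com/alleny0o/codeforces | 1941/c.py | min_removals_for_beautiful_string
-- ===== SOURCE A (Python) =====
-- def min_removals_for_beautiful_string(test_cases):
--     results = []
--
--     for n, s in test_cases:
--         i = 0
--         removals = 0
--         while i < n:
--             if i + 2 < n and (s[i:i+3] == "pie" or s[i:i+3] == "map"):
--                 removals += 1
--                 i += 3  # Skip the current substring since we're removing one char from it
--             else:
--                 i += 1
--         results.append(removals)
--
--     return results
-- ===== SOURCE B (Python) =====
-- def min_removals_for_beautiful_string(test_cases):
--     def _count(t):
--         count = 0
--         while True: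
--             p = t.find("pie")
--             m = t.find("map")
--             if p == -1 and m == -1:
--                 break
--             if p == -1 or (m != -1 and m < p):
--                 j = m
--             else:
--                 j = p
--             count += 1
--             t = t[j + 3:]
--         return count
--
--     return [_count(s[:n] if n > 0 else "") for n, s in test_cases]
-- ===== Notes on version B (the rewrite author's own statement) =====
-- stated objective: faster
-- what changed: A scans every index i in [0,n) and compares the 3-char slice s[i:i+3] at each position; B instead slices the prefix s[:n] once and repeatedly jumps straight to the next occurrence of 'pie' or 'map' with str.find, counting it and truncating past it, so the per-index slice-compare loop disappears.
import Mathlib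
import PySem

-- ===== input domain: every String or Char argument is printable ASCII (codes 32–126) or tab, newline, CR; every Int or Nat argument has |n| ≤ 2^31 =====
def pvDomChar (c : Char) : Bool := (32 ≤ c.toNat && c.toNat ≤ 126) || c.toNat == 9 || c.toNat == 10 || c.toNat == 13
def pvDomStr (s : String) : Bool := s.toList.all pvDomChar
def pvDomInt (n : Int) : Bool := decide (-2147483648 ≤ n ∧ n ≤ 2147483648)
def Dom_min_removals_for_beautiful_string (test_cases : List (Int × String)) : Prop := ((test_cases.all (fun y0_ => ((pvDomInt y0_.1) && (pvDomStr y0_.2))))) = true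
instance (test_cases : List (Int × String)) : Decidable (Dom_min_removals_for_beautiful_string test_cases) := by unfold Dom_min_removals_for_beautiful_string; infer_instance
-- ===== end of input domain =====

-- B replaces A's per-index scan-and-compare loop by a jump loop that repeatedly locates the next
-- "pie"/"map" occurrence with str.find and truncates past it (objective: alternative; same return values).

-- ===== PORT A =====
-- A's inner while loop: index i runs up to n, comparing the slice s[i:i+3] at each step.
def pvLoopA (n : Int) (cs : List Char) (i removals : Int) : Int :=
  if _h : i < n then
    if i + 2 < n ∧ (PySem.List.slice cs (some i) (some (i + 3)) = ['p', 'i', 'e'] ∨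
        PySem.List.slice cs (some i) (some (i + 3)) = ['m', 'a', 'p']) then
      pvLoopA n cs (i + 3) (removals + 1)
    else
      pvLoopA n cs (i + 1) removals
  else removals
termination_by (n - i).toNat
decreasing_by all_goals omega

def min_removals_for_beautiful_string (test_cases : List (Int × String)) : List Int :=
  test_cases.foldl (fun results p => results ++ [pvLoopA p.1 p.2.toList 0 0]) []

-- ===== PORT B =====
-- length of "pie"/"map" occurrences, needed by pvLoopB's termination (3 ≤ length when find succeeds)
theorem pvFind_len_le {t : List Char} {sub : List Char}
    (h : PySem.Chars.find t sub ≠ -1) : sub.length ≤ t.length := by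
  have := (PySem.Chars.find_ne_neg_one_iff (s := t) (sub := sub)).mp h
  exact this.length_le

-- termination measure fact for pvLoopB: truncating past a found occurrence shortens the list
theorem pvSliceFrom_len_lt (t : List Char) (j : Int) (hj : 0 ≤ j) (h3 : 3 ≤ t.length) :
    (PySem.List.slice t (some (j + 3)) none).length < t.length := by
  rw [PySem.List.slice_from t (by omega)]
  simp only [List.length_drop]
  omega

-- B's inner while loop: find the leftmost "pie"/"map", count it, drop through it, repeat.
def pvLoopB (t : List Char) (count : Int) : Int :=
  let p := PySem.Chars.find t ['p', 'i', 'e']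
  let m := PySem.Chars.find t ['m', 'a', 'p']
  if _h : p = -1 ∧ m = -1 then count
  else
    let j := if p = -1 ∨ (m ≠ -1 ∧ m < p) then m else p
    pvLoopB (PySem.List.slice t (some (j + 3)) none) (count + 1)
termination_by t.length
decreasing_by
  have hp := PySem.Chars.neg_one_le_find (s := t) (sub := ['p', 'i', 'e'])
  have hm := PySem.Chars.neg_one_le_find (s := t) (sub := ['m', 'a', 'p'])
  have h3 : 3 ≤ t.length := by
    rcases not_and_or.mp _h with h1 | h1
    · exact pvFind_len_le (sub := ['p', 'i', 'e']) h1
    · exact pvFind_len_le (sub := ['m', 'a', 'p']) h1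
  apply pvSliceFrom_len_lt _ _ ?_ h3
  split
  · next h1 =>
      rcases h1 with h1 | ⟨h1, _⟩
      · rcases not_and_or.mp _h with h2 | h2 <;> omega
      · omega
  · next h1 =>
      rw [not_or, not_and_or] at h1
      omega

def min_removals_for_beautiful_string_alt (test_cases : List (Int × String)) : List Int :=
  test_cases.map (fun p =>
    pvLoopB (if 0 < p.1 then PySem.List.slice p.2.toList none (some p.1) else []) 0)

-- ===== PRECONDITION & SPEC =====
def Spec_min_removals_for_beautiful_string (test_cases : List (Int × String)) (out : List Int) : Prop := out = min_removals_for_beautiful_string_alt test_cases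
instance (test_cases : List (Int × String)) (out : List Int) : Decidable (Spec_min_removals_for_beautiful_string test_cases out) := by unfold Spec_min_removals_for_beautiful_string; infer_instance

-- ===== CLAIM (what is proved, stated in full; the proofs are below) =====
def Claim_equal_min_removals_for_beautiful_string : Prop := ∀ (test_cases : List (Int × String)), Dom_min_removals_for_beautiful_string test_cases → Spec_min_removals_for_beautiful_string test_cases (min_removals_for_beautiful_string test_cases)

-- ===== LEMMAS AND PROOFS =====

-- the common greedy count both loops compute, as structural recursion on the character list
def pvGc : List Char → Int
  | [] => 0
  | c :: rest =>
    if (c :: rest).take 3 = ['p', 'i', 'e'] ∨ (c :: rest).take 3 = ['m', 'a', 'p'] then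
      1 + pvGc ((c :: rest).drop 3)
    else
      pvGc rest
termination_by t => t.length
decreasing_by all_goals (simp; try omega)

-- "a pie/map occurrence starts at position i of t"
def pvMatchAt (t : List Char) (i : Nat) : Prop :=
  ['p', 'i', 'e'] <+: t.drop i ∨ ['m', 'a', 'p'] <+: t.drop i

-- starting a match at position 0 is exactly "the first three characters are pie or map"
theorem pvMatchAt_zero_iff (t : List Char) :
    pvMatchAt t 0 ↔ (t.take 3 = ['p', 'i', 'e'] ∨ t.take 3 = ['m', 'a', 'p']) := by
  unfold pvMatchAt
  rw [List.drop_zero, List.prefix_iff_eq_take, List.prefix_iff_eq_take]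
  constructor <;> (rintro (h | h) <;> [exact Or.inl h.symm; exact Or.inr h.symm])

theorem pvMatchAt_cons (c : Char) (rest : List Char) (i : Nat) :
    pvMatchAt (c :: rest) (i + 1) ↔ pvMatchAt rest i := by
  unfold pvMatchAt
  rw [List.drop_succ_cons]

-- pvGc unfolding on a list whose head matches / does not match
theorem pvGc_pos (v : List Char)
    (h : v.take 3 = ['p', 'i', 'e'] ∨ v.take 3 = ['m', 'a', 'p']) :
    pvGc v = 1 + pvGc (v.drop 3) := by
  cases v with
  | nil => simp at h
  | cons c rest => rw [pvGc]; simp only [if_pos h]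

theorem pvGc_neg (v : List Char)
    (h1 : v.take 3 ≠ ['p', 'i', 'e']) (h2 : v.take 3 ≠ ['m', 'a', 'p']) :
    pvGc v = pvGc v.tail := by
  cases v with
  | nil => rfl
  | cons c rest =>
      rw [pvGc]
      simp only [List.tail_cons]
      rw [if_neg (by rintro (h | h) <;> [exact h1 h; exact h2 h])]

theorem pvGc_of_no_match (t : List Char) (h : ∀ i, ¬ pvMatchAt t i) : pvGc t = 0 := by
  induction t with
  | nil => simp [pvGc]
  | cons c rest ih =>
      rw [pvGc_neg (c :: rest)
            (fun hc => h 0 ((pvMatchAt_zero_iff _).mpr (Or.inl hc)))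
            (fun hc => h 0 ((pvMatchAt_zero_iff _).mpr (Or.inr hc)))]
      exact ih (fun i hi => h (i + 1) ((pvMatchAt_cons c rest i).mpr hi))

theorem pvGc_skip (k : Nat) (t : List Char) (hlt : ∀ i < k, ¬ pvMatchAt t i)
    (hk : pvMatchAt t k) : pvGc t = 1 + pvGc (t.drop (k + 3)) := by
  induction k generalizing t with
  | zero => exact pvGc_pos t ((pvMatchAt_zero_iff t).mp hk)
  | succ k ih =>
      cases t with
      | nil => simp [pvMatchAt] at hk
      | cons c rest =>
          have h0 := hlt 0 (Nat.succ_pos k)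
          rw [pvMatchAt_zero_iff] at h0
          rw [pvGc_neg (c :: rest) (fun hc => h0 (Or.inl hc)) (fun hc => h0 (Or.inr hc))]
          simp only [List.tail_cons]
          have := ih rest
            (fun i hi => fun hm => hlt (i + 1) (by omega) ((pvMatchAt_cons c rest i).mpr hm))
            ((pvMatchAt_cons c rest k).mp hk)
          rw [this, List.drop_succ_cons]

-- a prefix occurrence inside a suffix is an occurrence in the whole list
theorem pvPrefix_drop_infix {l t : List Char} {i : Nat} (h : l <+: t.drop i) : l <:+: t :=
  h.isInfix.trans (List.drop_suffix i t).isInfix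

theorem pvNo_occ {t sub : List Char} (h : PySem.Chars.find t sub = -1) :
    ∀ i : Nat, ¬ sub <+: t.drop i :=
  fun _ hp => ((PySem.Chars.find_eq_neg_one_iff t sub).mp h) (pvPrefix_drop_infix hp)

theorem pvLoopB_eq (t : List Char) (c : Int) : pvLoopB t c = c + pvGc t := by
  fun_induction pvLoopB t c with
  | case1 t c p m h =>
      rw [pvGc_of_no_match t
        (fun i hm => by
          rcases hm with hm | hm
          · exact pvNo_occ h.1 i hm
          · exact pvNo_occ h.2 i hm)]
      omega
  | case2 t c p m h j ih =>
      have hp := PySem.Chars.neg_one_le_find t ['p', 'i', 'e']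
      have hm := PySem.Chars.neg_one_le_find t ['m', 'a', 'p']
      have hdef : j = (if PySem.Chars.find t ['p', 'i', 'e'] = -1 ∨
          (PySem.Chars.find t ['m', 'a', 'p'] ≠ -1 ∧
            PySem.Chars.find t ['m', 'a', 'p'] < PySem.Chars.find t ['p', 'i', 'e']) then
          PySem.Chars.find t ['m', 'a', 'p'] else PySem.Chars.find t ['p', 'i', 'e']) := rfl
      have hj : 0 ≤ j := by
        rw [hdef]
        split_ifs with h2
        · rcases not_and_or.mp h with h1 | h1
          · rcases h2 with h2 | ⟨h2, _⟩ <;> omega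
          · rcases h2 with h2 | ⟨h2, _⟩ <;> omega
        · rw [not_or, not_and_or] at h2; omega
      have hone : pvMatchAt t j.toNat := by
        rw [hdef]
        split_ifs with h2
        · refine Or.inr (PySem.Chars.find_spec ?_).1
          rcases h2 with h2 | ⟨h2, _⟩ <;> rcases not_and_or.mp h with h1 | h1 <;> omega
        · rw [not_or, not_and_or] at h2
          exact Or.inl (PySem.Chars.find_spec (by omega)).1
      have hmin : ∀ i < j.toNat, ¬ pvMatchAt t i := by
        intro i hi hmatch
        rcases hmatch with hocc | hocc
        · by_cases hpneg : PySem.Chars.find t ['p', 'i', 'e'] = -1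
          · exact pvNo_occ hpneg i hocc
          · have hjp : j ≤ PySem.Chars.find t ['p', 'i', 'e'] := by
              rw [hdef]
              split_ifs with h2
              · rcases h2 with h2 | ⟨_, h2⟩ <;> omega
              · omega
            exact (PySem.Chars.find_spec (s := t) (sub := ['p', 'i', 'e'])
              (by omega)).2 i (by omega) hocc
        · by_cases hmneg : PySem.Chars.find t ['m', 'a', 'p'] = -1
          · exact pvNo_occ hmneg i hocc
          · have hjm : j ≤ PySem.Chars.find t ['m', 'a', 'p'] := by
              rw [hdef]
              split_ifs with h2
              · omega
              · rw [not_or, not_and_or] at h2; omega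
            exact (PySem.Chars.find_spec (s := t) (sub := ['m', 'a', 'p'])
              (by omega)).2 i (by omega) hocc
      rw [ih, PySem.List.slice_from t (by omega), pvGc_skip j.toNat t hmin hone]
      have h4 : (j + 3).toNat = j.toNat + 3 := by omega
      rw [h4]
      omega

theorem pvLoopA_eq (n : Int) (cs : List Char) (i r : Int) (hi : 0 ≤ i) :
    pvLoopA n cs i r = r + pvGc ((cs.take n.toNat).drop i.toNat) := by
  have main : ∀ (k : Nat) (i r : Int), 0 ≤ i → (n - i).toNat ≤ k →
      pvLoopA n cs i r = r + pvGc ((cs.take n.toNat).drop i.toNat) := by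
    intro k
    induction k with
    | zero =>
        intro i r hi0 hk
        rw [pvLoopA, dif_neg (by omega)]
        rw [List.drop_eq_nil_of_le (by rw [List.length_take]; omega)]
        simp [pvGc]
    | succ k ih =>
        intro i r hi0 hk
        -- the three-character window of the remaining suffix, when it fits the n bound
        have hwin : i + 2 < n →
            ((cs.take n.toNat).drop i.toNat).take 3 =
              PySem.List.slice cs (some i) (some (i + 3)) := by
          intro hn
          rw [PySem.List.slice_toNat cs hi0 (by omega), List.drop_take, List.take_take]
          have h1 : min 3 (n.toNat - i.toNat) = 3 := by omega
          have h2 : (i + 3).toNat - i.toNat = 3 := by omega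
          rw [h1, h2]
        rw [pvLoopA]
        split_ifs with h1 h2
        · -- matched: count it and jump three characters
          rw [ih (i + 3) (r + 1) (by omega) (by omega)]
          have hdrop : (cs.take n.toNat).drop (i + 3).toNat =
              ((cs.take n.toNat).drop i.toNat).drop 3 := by
            rw [List.drop_drop]
            congr 1
            omega
          have hv3 : (List.drop i.toNat (List.take n.toNat cs)).take 3 = ['p', 'i', 'e'] ∨
              (List.drop i.toNat (List.take n.toNat cs)).take 3 = ['m', 'a', 'p'] := by
            rw [hwin h2.1]; exact h2.2
          rw [hdrop, pvGc_pos (List.drop i.toNat (List.take n.toNat cs)) hv3]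
          omega
        · -- no match at i: advance by one
          rw [ih (i + 1) r (by omega) (by omega)]
          have hdrop : (cs.take n.toNat).drop (i + 1).toNat =
              ((cs.take n.toNat).drop i.toNat).tail := by
            rw [← List.drop_one, List.drop_drop]
            congr 1
            omega
          have hA : (List.drop i.toNat (List.take n.toNat cs)).take 3 ≠ ['p', 'i', 'e'] := by
            by_cases hn : i + 2 < n
            · rw [hwin hn]
              intro hc
              exact h2 ⟨hn, Or.inl hc⟩
            · -- fewer than three characters remain before the n bound
              intro hc
              have := congrArg List.length hc
              simp only [List.length_take, List.length_drop, List.length_cons,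
                List.length_nil] at this
              omega
          have hB : (List.drop i.toNat (List.take n.toNat cs)).take 3 ≠ ['m', 'a', 'p'] := by
            by_cases hn : i + 2 < n
            · rw [hwin hn]
              intro hc
              exact h2 ⟨hn, Or.inr hc⟩
            · intro hc
              have := congrArg List.length hc
              simp only [List.length_take, List.length_drop, List.length_cons,
                List.length_nil] at this
              omega
          rw [hdrop, pvGc_neg (List.drop i.toNat (List.take n.toNat cs)) hA hB]
        · rw [List.drop_eq_nil_of_le (by rw [List.length_take]; omega)]
          simp [pvGc]
  exact main (n - i).toNat i r hi le_rfl

-- ===== VERDICT (by name: the statement is the Claim_ definition above) =====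
theorem min_removals_for_beautiful_string_spec : Claim_equal_min_removals_for_beautiful_string := by
  intro tcs _
  unfold Spec_min_removals_for_beautiful_string min_removals_for_beautiful_string
    min_removals_for_beautiful_string_alt
  rw [PySem.List.foldl_append_singleton_eq_map]
  simp only [List.nil_append]
  apply List.map_congr_left
  intro p _
  rw [pvLoopA_eq _ _ _ _ le_rfl, pvLoopB_eq]
  simp only [zero_add]
  split_ifs with h
  · rw [PySem.List.slice_to p.2.toList (le_of_lt h)]
    simp
  · have : p.1.toNat = 0 := by omega
    simp [this]
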